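-- pv_equiv track=rewrite | github.com/morrrrr/CryptoMasters | 4_feistel.py | string_to_int_blocks
-- ===== SOURCE A (Python) =====
-- def string_to_int_blocks(_text):
--     int_blocks = []
--     for i in range(0, len(_text), 2):
--         block = [ord(_text[i])]
--         if i + 1 < len(_text):
--             block.append(ord(_text[i + 1]))
--         else:
--             # append letter A to pad the last block if needed
--             block.append(ord('A'))
--         int_blocks.append(block)
--     return int_blocks
-- ===== SOURCE B (Python) =====
-- def string_to_int_blocks(_text):
--     codes = [ord(c) for c in _text]
--     if len(codes) % 2 == 1:
--         codes = codes + [ord('A')]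
--     return [codes[i:i + 2] for i in range(0, len(codes), 2)]
-- ===== Notes on version B (the rewrite author's own statement) =====
-- stated objective: alternative
-- what changed: Replaces A's per-index loop with a bound-check-and-pad inside each iteration by a three-pass decomposition: map the whole string to code points, pad the flat list once if its length is odd, then group it into consecutive pairs by slicing.
import Mathlib
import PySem

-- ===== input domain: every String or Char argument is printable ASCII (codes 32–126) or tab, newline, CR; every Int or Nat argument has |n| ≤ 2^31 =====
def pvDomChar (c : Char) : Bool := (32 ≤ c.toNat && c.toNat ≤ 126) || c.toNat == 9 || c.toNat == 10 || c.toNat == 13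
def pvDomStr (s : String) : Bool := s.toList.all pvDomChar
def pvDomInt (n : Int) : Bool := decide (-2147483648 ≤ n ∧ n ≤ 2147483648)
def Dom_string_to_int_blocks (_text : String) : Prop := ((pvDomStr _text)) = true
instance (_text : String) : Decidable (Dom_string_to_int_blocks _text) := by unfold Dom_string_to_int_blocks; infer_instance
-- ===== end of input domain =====

-- B replaces A's per-index loop (bound check + pad inside each iteration) by map, pad once, chunk
-- into pairs; same cost, alternative decomposition. Return values proved equal on all of Dom.

-- ===== PORT A =====
def string_to_int_blocks (_text : String) : List (List Int) :=
  let cs := _text.toList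
  (PySem.List.pyRange 0 (cs.length : Int) 2).foldl
    (fun int_blocks i =>
      -- block = [ord(_text[i])]; indices produced by the range are always in bounds,
      -- so the pyGetD default is never read
      let block : List Int := [((PySem.List.pyGetD cs i 'A').toNat : Int)]
      let block := if i + 1 < (cs.length : Int)
        then block ++ [((PySem.List.pyGetD cs (i + 1) 'A').toNat : Int)]
        else block ++ [(65 : Int)]
      int_blocks ++ [block])
    []

-- ===== PORT B =====
def string_to_int_blocks_alt (_text : String) : List (List Int) :=
  let codes := _text.toList.map (fun c => (c.toNat : Int))
  let codes := if codes.length % 2 = 1 then codes ++ [(65 : Int)] else codes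
  (PySem.List.pyRange 0 (codes.length : Int) 2).map
    (fun i => PySem.List.slice codes (some i) (some (i + 2)))

-- ===== PRECONDITION & SPEC =====
def Spec_string_to_int_blocks (_text : String) (out : List (List Int)) : Prop := out = string_to_int_blocks_alt _text
instance (_text : String) (out : List (List Int)) : Decidable (Spec_string_to_int_blocks _text out) := by unfold Spec_string_to_int_blocks; infer_instance

-- ===== CLAIM (what is proved, stated in full; the proofs are below) =====
def Claim_equal_string_to_int_blocks : Prop := ∀ (_text : String), Dom_string_to_int_blocks _text → Spec_string_to_int_blocks _text (string_to_int_blocks _text)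

-- ===== LEMMAS AND PROOFS =====

-- proof-side view of B's chunking pass: consecutive pairs of an even-length list
def pairsRec : List Int → List (List Int)
  | [] => []
  | a :: b :: rest => [a, b] :: pairsRec rest
  | _ => []

-- the element count of range(0, n, 2)
theorem count2 (n : Nat) :
    (if (0 : Int) < (n : Int) then (((n : Int) - 0 + 2 - 1) / 2).toNat else 0) = (n + 1) / 2 := by
  split_ifs with h <;> omega

-- the block A builds at loop index 2*k, as a function of the Nat position k
def blockOf (cs : List Char) (k : Nat) : List Int :=
  [((cs.getD (2 * k) 'A').toNat : Int),
   if 2 * k + 1 < cs.length then ((cs.getD (2 * k + 1) 'A').toNat : Int) else 65]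

theorem blockOf_shift (a b : Char) (rest : List Char) (k : Nat) :
    blockOf (a :: b :: rest) (k + 1) = blockOf rest k := by
  simp only [blockOf]
  have h1 : 2 * (k + 1) = (2 * k) + 1 + 1 := by omega
  rw [h1]
  simp [List.length_cons]

theorem padA_cons_cons (x y : Int) (l : List Int) :
    (if (x :: y :: l).length % 2 = 1 then (x :: y :: l) ++ [(65 : Int)] else x :: y :: l)
      = x :: y :: (if l.length % 2 = 1 then l ++ [(65 : Int)] else l) := by
  simp only [List.length_cons]
  have : (l.length + 1 + 1) % 2 = l.length % 2 := by omega
  simp only [this]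
  split_ifs <;> simp

theorem key (cs : List Char) :
    (List.range ((cs.length + 1) / 2)).map (blockOf cs)
      = pairsRec
          (if (cs.map (fun c => (c.toNat : Int))).length % 2 = 1
            then cs.map (fun c => (c.toNat : Int)) ++ [(65 : Int)]
            else cs.map (fun c => (c.toNat : Int))) := by
  match cs with
  | [] => simp [pairsRec]
  | [a] => simp [blockOf, pairsRec]
  | a :: b :: rest =>
    have ih := key rest
    have hlen : ((a :: b :: rest).length + 1) / 2 = (rest.length + 1) / 2 + 1 := by
      simp [List.length_cons]; omega
    rw [hlen, List.range_succ_eq_map, List.map_cons, List.map_map]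
    have hmap : ((List.range ((rest.length + 1) / 2)).map (blockOf (a :: b :: rest) ∘ Nat.succ))
        = (List.range ((rest.length + 1) / 2)).map (blockOf rest) := by
      apply List.map_congr_left
      intro k _
      simpa using blockOf_shift a b rest k
    rw [hmap, ih, List.map_cons, List.map_cons, padA_cons_cons]
    have h0 : blockOf (a :: b :: rest) 0 = [(a.toNat : Int), (b.toNat : Int)] := by
      simp [blockOf]
    rw [h0]
    rfl

theorem A_eq_map (t : String) :
    string_to_int_blocks t = (List.range ((t.toList.length + 1) / 2)).map (blockOf t.toList) := by
  unfold string_to_int_blocks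
  set cs := t.toList with hcs
  rw [PySem.List.foldl_append_singleton_eq_map
        (fun i => (if i + 1 < (cs.length : Int)
          then [((PySem.List.pyGetD cs i 'A').toNat : Int)] ++ [((PySem.List.pyGetD cs (i + 1) 'A').toNat : Int)]
          else [((PySem.List.pyGetD cs i 'A').toNat : Int)] ++ [(65 : Int)]))]
  rw [PySem.List.pyRange_of_pos 0 (cs.length : Int) (by norm_num), List.map_map, List.nil_append]
  rw [count2 cs.length]
  apply List.map_congr_left
  intro k hk
  rw [List.mem_range] at hk
  simp only [Function.comp]
  have hi : (0 : Int) + 2 * (k : Int) = ((2 * k : Nat) : Int) := by push_cast; ring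
  rw [hi]
  rw [show ((2 * k : Nat) : Int) + 1 = ((2 * k + 1 : Nat) : Int) by push_cast; ring]
  rw [PySem.List.pyGetD_natCast, PySem.List.pyGetD_natCast]
  have hcond : (((2 * k + 1 : Nat) : Int) < (cs.length : Int)) ↔ (2 * k + 1 < cs.length) := by
    exact_mod_cast Iff.rfl
  simp only [blockOf]
  split_ifs with h1 h2 h2
  · rfl
  · exact absurd (hcond.mp h1) h2
  · exact absurd (hcond.mpr h2) h1
  · rfl

theorem dropTake_pairs (l : List Int) (hev : l.length % 2 = 0) :
    (List.range ((l.length + 1) / 2)).map (fun k => (l.drop (2 * k)).take 2) = pairsRec l := by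
  match l with
  | [] => simp [pairsRec]
  | [a] => simp at hev
  | a :: b :: rest =>
    have hev' : rest.length % 2 = 0 := by simp [List.length_cons] at hev ⊢; omega
    have ih := dropTake_pairs rest hev'
    have hlen : ((a :: b :: rest).length + 1) / 2 = (rest.length + 1) / 2 + 1 := by
      simp [List.length_cons]; omega
    rw [hlen, List.range_succ_eq_map, List.map_cons, List.map_map]
    have hmap : ((List.range ((rest.length + 1) / 2)).map
        ((fun k => ((a :: b :: rest).drop (2 * k)).take 2) ∘ Nat.succ))
        = (List.range ((rest.length + 1) / 2)).map (fun k => (rest.drop (2 * k)).take 2) := by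
      apply List.map_congr_left
      intro k _
      have : 2 * Nat.succ k = (2 * k) + 1 + 1 := by omega
      simp [Function.comp, this]
    rw [hmap, ih]
    rfl

theorem B_eq_pairs (t : String) :
    string_to_int_blocks_alt t
      = pairsRec (if (t.toList.map (fun c => (c.toNat : Int))).length % 2 = 1
          then t.toList.map (fun c => (c.toNat : Int)) ++ [(65 : Int)]
          else t.toList.map (fun c => (c.toNat : Int))) := by
  simp only [string_to_int_blocks_alt]
  set codes := if (t.toList.map (fun c => (c.toNat : Int))).length % 2 = 1
      then t.toList.map (fun c => (c.toNat : Int)) ++ [(65 : Int)]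
      else t.toList.map (fun c => (c.toNat : Int)) with hcodes
  have hev : codes.length % 2 = 0 := by
    rw [hcodes]
    split_ifs with h
    · simp only [List.length_append, List.length_map, List.length_cons, List.length_nil] at h ⊢
      omega
    · simp only [List.length_map] at h ⊢
      omega
  rw [PySem.List.pyRange_of_pos 0 (codes.length : Int) (by norm_num), List.map_map,
    count2 codes.length]
  rw [← dropTake_pairs codes hev]
  apply List.map_congr_left
  intro k hk
  simp only [Function.comp]
  have hi : (0 : Int) + 2 * (k : Int) = ((2 * k : Nat) : Int) := by push_cast; ring
  rw [hi, show ((2 * k : Nat) : Int) + 2 = ((2 * k + 2 : Nat) : Int) by push_cast; ring,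
    PySem.List.slice_natCast]
  have : 2 * k + 2 - 2 * k = 2 := by omega
  rw [this]

-- ===== VERDICT (by name: the statement is the Claim_ definition above) =====
theorem string_to_int_blocks_spec : Claim_equal_string_to_int_blocks := by
  intro t _
  unfold Spec_string_to_int_blocks
  rw [A_eq_map t, B_eq_pairs t]
  exact key t.toList
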